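-- pv_equiv track=rewrite | github.com/konszymanski/leetcode-dataset | obfuscated_solutions/python/2900-longest-unequal-adjacent-groups-subsequence-i/solution_1_l0_l2_l3.py | getLongestSubsequence
-- ===== SOURCE A (Python) =====
-- from typing import List
--
-- def getLongestSubsequence(words: List[str], groups: List[int]) -> List[str]:
--     n = len(words)
--     dp = [1] * n
--     prev = [-1] * n
--     if 1 + 1 == 2:
--         (max_len, end_index) = (1, 0)
--     for i in range(1, n):
--         v_junk_30 = 48
--         (best_len, best_prev) = (1, -1)
--         for j in range(i - 1, -1, -1):
--             v_junk_39 = 13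
--             if groups[i] != groups[j] and dp[j] + 1 > best_len:
--                 (best_len, best_prev) = (dp[j] + 1, j)
--         dp[i] = best_len
--         prev[i] = best_prev
--         if dp[i] > max_len:
--             (max_len, end_index) = (dp[i], i)
--     res = []
--     i = end_index
--     while i != -1:
--         res.append(words[i])
--         i = prev[i]
--     return res[::-1]
-- ===== SOURCE B (Python) =====
-- from typing import List
--
-- def getLongestSubsequence(words: List[str], groups: List[int]) -> List[str]:
--     n = len(words)
--     res = [words[i] for i in range(n - 1) if groups[i] != groups[i + 1]]
--     s = n - 1
--     while s > 0 and groups[s - 1] == groups[s]: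
--         s -= 1
--     res.append(words[s])
--     return res
-- ===== Notes on version B (the rewrite author's own statement) =====
-- stated objective: faster
-- what changed: A fills dp/prev with an O(n^2) quadratic DP plus backtracking; B uses the run structure of the problem directly: the optimal picks are exactly the last word of every group-run plus the first word of the final run, collected in one linear pass (a filter on adjacent boundaries plus one backward scan for the last run's start).
import Mathlib
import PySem

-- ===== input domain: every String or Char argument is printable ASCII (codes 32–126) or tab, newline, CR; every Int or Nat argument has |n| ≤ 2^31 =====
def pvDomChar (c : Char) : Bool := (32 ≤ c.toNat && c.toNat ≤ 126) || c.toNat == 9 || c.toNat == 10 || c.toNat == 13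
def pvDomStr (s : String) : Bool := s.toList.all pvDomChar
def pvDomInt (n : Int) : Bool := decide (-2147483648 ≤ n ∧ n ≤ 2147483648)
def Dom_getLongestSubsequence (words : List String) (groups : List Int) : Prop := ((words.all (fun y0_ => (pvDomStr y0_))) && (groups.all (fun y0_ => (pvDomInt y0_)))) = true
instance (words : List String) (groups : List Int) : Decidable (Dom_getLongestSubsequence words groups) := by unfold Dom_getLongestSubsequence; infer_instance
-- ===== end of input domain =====

-- B replaces A's O(n^2) dp/prev dynamic programming with a single O(n) pass over the run
-- structure: it keeps the last word of every run of equal groups and the first word of the last run.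


-- ===== PORT A =====
-- inner loop `for j in range(i - 1, -1, -1)`, fuel = i, j descends i-1 … 0; state (best_len, best_prev)
def pvInnerA (groups dp : List Int) (gi : Int) : ℕ → Int × Int → Int × Int
  | 0, st => st
  | j + 1, (bl, bp) =>
      pvInnerA groups dp gi j
        (if gi ≠ PySem.List.pyGetD groups (j : Int) 0 ∧ PySem.List.pyGetD dp (j : Int) 0 + 1 > bl
         then (PySem.List.pyGetD dp (j : Int) 0 + 1, (j : Int)) else (bl, bp))

-- one iteration of the outer `for i in range(1, n)` over state (dp, prev, max_len, end_index)
def pvStepA (groups : List Int) (st : List Int × List Int × Int × Int) (i : ℕ) :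
    List Int × List Int × Int × Int :=
  let bb := pvInnerA groups st.1 (PySem.List.pyGetD groups (i : Int) 0) i (1, -1)
  let dp' := PySem.List.pySetD st.1 (i : Int) bb.1
  let prev' := PySem.List.pySetD st.2.1 (i : Int) bb.2
  if bb.1 > st.2.2.1 then (dp', prev', bb.1, (i : Int)) else (dp', prev', st.2.2.1, st.2.2.2)

-- `while i != -1: res.append(words[i]); i = prev[i]`; fuel n+1 suffices (prev strictly decreases)
def pvBackA (words : List String) (prev : List Int) : ℕ → Int → List String → List String
  | 0, _, acc => acc
  | f + 1, i, acc =>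
      if i = -1 then acc
      else pvBackA words prev f (PySem.List.pyGetD prev i (-1)) (acc ++ [PySem.List.pyGetD words i ""])

def getLongestSubsequence (words : List String) (groups : List Int) : List String :=
  let n := words.length
  -- List.range' 1 (n-1) = [1, …, n-1] = range(1, n)
  let st := (List.range' 1 (n - 1)).foldl (pvStepA groups)
      (List.replicate n (1 : Int), List.replicate n (-1 : Int), 1, 0)
  (pvBackA words st.2.1 (n + 1) st.2.2.2 []).reverse

-- ===== PORT B =====
-- `while s > 0 and groups[s-1] == groups[s]: s -= 1`, started at s = n-1
def pvRunStart (groups : List Int) : ℕ → ℕ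
  | 0 => 0
  | s + 1 => if groups.getD s 0 = groups.getD (s + 1) 0 then pvRunStart groups s else s + 1

def getLongestSubsequence_alt (words : List String) (groups : List Int) : List String :=
  let n := words.length
  ((List.range (n - 1)).filter
      (fun i => groups.getD i 0 != groups.getD (i + 1) 0)).map (fun i => words.getD i "")
    ++ [words.getD (pvRunStart groups (n - 1)) ""]

-- ===== PRECONDITION & SPEC =====
-- Pre_ excludes exactly the inputs where the Python A raises IndexError: empty words
-- (words[end_index] with end_index = 0) and groups shorter than words (groups[i]).
def Pre_getLongestSubsequence (words : List String) (groups : List Int) : Prop :=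
  words ≠ [] ∧ words.length ≤ groups.length
instance (words : List String) (groups : List Int) : Decidable (Pre_getLongestSubsequence words groups) := by unfold Pre_getLongestSubsequence; infer_instance

def pvWitness_getLongestSubsequence : List String × List Int := (["a", "b", "c"], [1, 1, 2])

def Spec_getLongestSubsequence (words : List String) (groups : List Int) (out : List String) : Prop := out = getLongestSubsequence_alt words groups
instance (words : List String) (groups : List Int) (out : List String) : Decidable (Spec_getLongestSubsequence words groups out) := by unfold Spec_getLongestSubsequence; infer_instance

-- ===== CLAIM (what is proved, stated in full; the proofs are below) =====
def Claim_equal_getLongestSubsequence : Prop := ∀ (words : List String) (groups : List Int), Dom_getLongestSubsequence words groups → Pre_getLongestSubsequence words groups → Spec_getLongestSubsequence words groups (getLongestSubsequence words groups)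

-- ===== LEMMAS AND PROOFS =====

-- abbreviations over the group list
def pvBndB (groups : List Int) (j : ℕ) : Bool := groups.getD j 0 != groups.getD (j + 1) 0
def pvFil (groups : List Int) (t : ℕ) : List ℕ := (List.range t).filter (pvBndB groups)
def pvDpF (groups : List Int) (t : ℕ) : Int := 1 + ((List.range t).countP (pvBndB groups) : ℤ)

theorem pvBndB_true {groups : List Int} {j : ℕ} :
    pvBndB groups j = true ↔ groups.getD j 0 ≠ groups.getD (j + 1) 0 := by
  rw [pvBndB]; exact bne_iff_ne

theorem pvBndB_false {groups : List Int} {j : ℕ} :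
    pvBndB groups j = false ↔ groups.getD j 0 = groups.getD (j + 1) 0 := by
  rw [← Bool.not_eq_true, pvBndB_true, not_ne_iff]

theorem rs_le (groups : List Int) (t : ℕ) : pvRunStart groups t ≤ t := by
  induction t with
  | zero => simp [pvRunStart]
  | succ s ih => unfold pvRunStart; split <;> omega

theorem rs_bnd (groups : List Int) (t : ℕ) (h : 0 < pvRunStart groups t) :
    pvBndB groups (pvRunStart groups t - 1) = true := by
  induction t with
  | zero => simp [pvRunStart] at h
  | succ s ih =>
      unfold pvRunStart at h ⊢
      split
      · next heq => exact ih (by rwa [if_pos heq] at h)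
      · next hne =>
        have : s + 1 - 1 = s := by omega
        rw [this, pvBndB_true]; exact hne

theorem rs_idem (groups : List Int) (t : ℕ) :
    pvRunStart groups (pvRunStart groups t) = pvRunStart groups t := by
  cases h : pvRunStart groups t with
  | zero => simp [pvRunStart]
  | succ k =>
      have hb := rs_bnd groups t (by omega)
      rw [h] at hb
      have hk : k + 1 - 1 = k := by omega
      rw [hk, pvBndB_true] at hb
      unfold pvRunStart
      rw [if_neg hb]

theorem fil_succ (groups : List Int) (s : ℕ) :
    pvFil groups (s + 1) = pvFil groups s ++ if pvBndB groups s then [s] else [] := by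
  rw [pvFil, List.range_succ, List.filter_append, ← pvFil]
  congr 1
  split <;> simp_all

theorem rs_succ_pos (groups : List Int) (s : ℕ) (heq : groups.getD s 0 = groups.getD (s + 1) 0) :
    pvRunStart groups (s + 1) = pvRunStart groups s := by
  rw [show pvRunStart groups (s + 1) = if groups.getD s 0 = groups.getD (s + 1) 0
        then pvRunStart groups s else s + 1 from rfl, if_pos heq]

theorem rs_succ_neg (groups : List Int) (s : ℕ) (hne : ¬ groups.getD s 0 = groups.getD (s + 1) 0) :
    pvRunStart groups (s + 1) = s + 1 := by
  rw [show pvRunStart groups (s + 1) = if groups.getD s 0 = groups.getD (s + 1) 0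
        then pvRunStart groups s else s + 1 from rfl, if_neg hne]

theorem fil_eq (groups : List Int) (t : ℕ) :
    pvFil groups t = if pvRunStart groups t = 0 then []
      else pvFil groups (pvRunStart groups t - 1) ++ [pvRunStart groups t - 1] := by
  induction t with
  | zero => simp [pvFil, pvRunStart]
  | succ s ih =>
      rw [fil_succ]
      by_cases heq : groups.getD s 0 = groups.getD (s + 1) 0
      · rw [if_neg (by rw [pvBndB_true]; exact not_not_intro heq), List.append_nil, ih,
            rs_succ_pos groups s heq]
      · rw [if_pos (pvBndB_true.mpr heq), rs_succ_neg groups s heq, if_neg (by omega)]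
        simp

def pvPF (groups : List Int) (t : ℕ) : Int :=
  if pvRunStart groups t = 0 then -1 else ((pvRunStart groups t - 1 : ℕ) : Int)

theorem dpF_one_le (groups : List Int) (t : ℕ) : 1 ≤ pvDpF groups t := by
  rw [pvDpF]; omega

theorem dpF_mono (groups : List Int) {j t : ℕ} (h : j ≤ t) :
    pvDpF groups j ≤ pvDpF groups t := by
  rw [pvDpF, pvDpF]
  have := List.Sublist.countP_le (p := pvBndB groups) (List.range_sublist.mpr h)
  omega

theorem dpF_fil (groups : List Int) (t : ℕ) :
    pvDpF groups t = 1 + ((pvFil groups t).length : ℤ) := by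
  rw [pvDpF, pvFil, List.countP_eq_length_filter]

theorem dpF_rs (groups : List Int) (t : ℕ) :
    pvDpF groups t = if pvRunStart groups t = 0 then 1
      else pvDpF groups (pvRunStart groups t - 1) + 1 := by
  rw [dpF_fil, fil_eq]
  split
  · simp
  · rw [dpF_fil]; simp; omega

theorem dpF_rs_eq (groups : List Int) (t : ℕ) :
    pvDpF groups (pvRunStart groups t) = pvDpF groups t := by
  rw [dpF_rs groups (pvRunStart groups t), rs_idem, dpF_rs groups t]

theorem dpF_succ (groups : List Int) (s : ℕ) :
    pvDpF groups (s + 1) = pvDpF groups s + if pvBndB groups s then 1 else 0 := by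
  rw [dpF_fil, dpF_fil, fil_succ]
  split
  · simp; omega
  · simp

theorem find_rs (groups : List Int) (t : ℕ) :
    (List.range t).reverse.find? (fun j => groups.getD t 0 != groups.getD j 0)
      = if pvRunStart groups t = 0 then none else some (pvRunStart groups t - 1) := by
  induction t with
  | zero => simp [pvRunStart]
  | succ s ih =>
      rw [List.range_succ, List.reverse_append]
      simp only [List.reverse_singleton, List.singleton_append, List.find?_cons]
      by_cases heq : groups.getD s 0 = groups.getD (s + 1) 0
      · have hb : (groups.getD (s + 1) 0 != groups.getD s 0) = false := by
          rw [bne_eq_false_iff_eq]; exact heq.symm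
        rw [hb]
        have hp : (fun j => groups.getD (s + 1) 0 != groups.getD j 0)
            = (fun j => groups.getD s 0 != groups.getD j 0) := by
          funext j; rw [heq]
        rw [hp, ih, rs_succ_pos groups s heq]
      · have hb : (groups.getD (s + 1) 0 != groups.getD s 0) = true := by
          rw [bne_iff_ne]; exact fun h => heq h.symm
        rw [hb, rs_succ_neg groups s heq, if_neg (by omega)]
        simp

theorem innerA_spec (groups dp : List Int) (gi : Int) (m : ℕ)
    (hdp : ∀ j, j < m → PySem.List.pyGetD dp (j : Int) 0 = pvDpF groups j) :
    ∀ bl bp, pvInnerA groups dp gi m (bl, bp) =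
      match (List.range m).reverse.find?
          (fun j => (gi != groups.getD j 0) && decide (pvDpF groups j + 1 > bl)) with
      | none => (bl, bp)
      | some k => (pvDpF groups k + 1, (k : Int)) := by
  induction m with
  | zero => intro bl bp; simp [pvInnerA]
  | succ s ih =>
      intro bl bp
      rw [show pvInnerA groups dp gi (s + 1) (bl, bp) = pvInnerA groups dp gi s
            (if gi ≠ PySem.List.pyGetD groups (s : Int) 0 ∧ PySem.List.pyGetD dp (s : Int) 0 + 1 > bl
             then (PySem.List.pyGetD dp (s : Int) 0 + 1, (s : Int)) else (bl, bp)) from rfl]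
      rw [List.range_succ, List.reverse_append]
      simp only [List.reverse_singleton, List.singleton_append, List.find?_cons]
      have hds : PySem.List.pyGetD dp (s : Int) 0 = pvDpF groups s := hdp s (by omega)
      have hgs : PySem.List.pyGetD groups (s : Int) 0 = groups.getD s 0 :=
        PySem.List.pyGetD_natCast groups s 0
      by_cases hc : gi ≠ groups.getD s 0 ∧ pvDpF groups s + 1 > bl
      · have hb : ((gi != groups.getD s 0) && decide (pvDpF groups s + 1 > bl)) = true := by
          simp only [Bool.and_eq_true, bne_iff_ne, decide_eq_true_eq]
          exact ⟨hc.1, hc.2⟩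
        rw [if_pos (by rw [hgs, hds]; exact hc), hb, hds,
            ih (fun j hj => hdp j (by omega)) (pvDpF groups s + 1) (s : Int)]
        have hnone : (List.range s).reverse.find?
            (fun j => (gi != groups.getD j 0) && decide (pvDpF groups j + 1 > pvDpF groups s + 1)) = none := by
          rw [List.find?_eq_none]
          intro j hj
          have hjs : j < s := by
            have := List.mem_reverse.mp hj; simpa [List.mem_range] using this
          have := dpF_mono groups (le_of_lt hjs)
          simp; intro _; omega
        rw [hnone]
      · have hb : ((gi != groups.getD s 0) && decide (pvDpF groups s + 1 > bl)) = false := by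
          rw [Bool.and_eq_false_iff]
          by_cases h1 : gi = groups.getD s 0
          · left; rwa [bne_eq_false_iff_eq]
          · right; simp; push Not at hc; exact hc h1
        rw [if_neg (by rw [hgs, hds]; exact hc), hb,
            ih (fun j hj => hdp j (by omega)) bl bp]

theorem innerA_final (groups dp : List Int) (i : ℕ)
    (hdp : ∀ j, j < i → PySem.List.pyGetD dp (j : Int) 0 = pvDpF groups j) :
    pvInnerA groups dp (groups.getD i 0) i (1, -1) = (pvDpF groups i, pvPF groups i) := by
  rw [innerA_spec groups dp (groups.getD i 0) i hdp 1 (-1)]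
  have hp : (fun j => (groups.getD i 0 != groups.getD j 0) && decide (pvDpF groups j + 1 > (1:Int)))
      = (fun j => groups.getD i 0 != groups.getD j 0) := by
    funext j
    have := dpF_one_le groups j
    simp [decide_eq_true_eq]
    omega
  rw [hp, find_rs groups i, pvPF]
  by_cases h0 : pvRunStart groups i = 0
  · rw [if_pos h0, if_pos h0]
    have := dpF_rs groups i
    rw [if_pos h0] at this
    rw [this]
  · rw [if_neg h0, if_neg h0]
    have := dpF_rs groups i
    rw [if_neg h0] at this
    simp only []
    rw [← this]

theorem outer_inv (groups : List Int) (n : ℕ) (hn : 0 < n) :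
    ∀ m, m < n →
      (((List.range' 1 m).foldl (pvStepA groups)
          (List.replicate n (1 : Int), List.replicate n (-1 : Int), 1, 0)).1.length = n ∧
       ((List.range' 1 m).foldl (pvStepA groups)
          (List.replicate n (1 : Int), List.replicate n (-1 : Int), 1, 0)).2.1.length = n ∧
       (∀ k, k ≤ m → PySem.List.pyGetD ((List.range' 1 m).foldl (pvStepA groups)
          (List.replicate n (1 : Int), List.replicate n (-1 : Int), 1, 0)).1 (k : Int) 0 = pvDpF groups k) ∧
       (∀ k, k ≤ m → PySem.List.pyGetD ((List.range' 1 m).foldl (pvStepA groups)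
          (List.replicate n (1 : Int), List.replicate n (-1 : Int), 1, 0)).2.1 (k : Int) 0 = pvPF groups k) ∧
       ((List.range' 1 m).foldl (pvStepA groups)
          (List.replicate n (1 : Int), List.replicate n (-1 : Int), 1, 0)).2.2.1
            = pvDpF groups (pvRunStart groups m) ∧
       ((List.range' 1 m).foldl (pvStepA groups)
          (List.replicate n (1 : Int), List.replicate n (-1 : Int), 1, 0)).2.2.2
            = ((pvRunStart groups m : ℕ) : Int)) := by
  intro m
  induction m with
  | zero =>
      intro _
      simp only [show List.range' 1 0 = [] from rfl, List.foldl_nil]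
      refine ⟨by simp, by simp, ?_, ?_, by simp [pvRunStart, pvDpF], by simp [pvRunStart]⟩
      · intro k hk
        have : k = 0 := by omega
        subst this
        rw [PySem.List.pyGetD_natCast, List.getD_replicate 1 hn, pvDpF]
        simp
      · intro k hk
        have : k = 0 := by omega
        subst this
        rw [PySem.List.pyGetD_natCast, List.getD_replicate (-1) hn, pvPF]
        simp [pvRunStart]
  | succ m ih =>
      intro hm
      obtain ⟨hl1, hl2, hdp, hpf, hmax, hend⟩ := ih (by omega)
      rw [List.range'_1_concat, List.foldl_append, List.foldl_cons, List.foldl_nil]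
      set st := (List.range' 1 m).foldl (pvStepA groups)
          (List.replicate n (1 : Int), List.replicate n (-1 : Int), 1, 0) with hst
      have h1m : 1 + m = m + 1 := by omega
      rw [h1m]
      have hbb : pvInnerA groups st.1 (PySem.List.pyGetD groups ((m+1 : ℕ) : Int) 0) (m+1) (1, -1)
          = (pvDpF groups (m+1), pvPF groups (m+1)) := by
        rw [PySem.List.pyGetD_natCast]
        exact innerA_final groups st.1 (m+1) (fun j hj => hdp j (by omega))
      have hstep : pvStepA groups st (m+1) =
          (PySem.List.pySetD st.1 ((m+1 : ℕ) : Int) (pvDpF groups (m+1)),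
           PySem.List.pySetD st.2.1 ((m+1 : ℕ) : Int) (pvPF groups (m+1)),
           if pvDpF groups (m+1) > st.2.2.1 then (pvDpF groups (m+1), ((m+1 : ℕ) : Int))
           else (st.2.2.1, st.2.2.2)) := by
        rw [pvStepA, hbb]
        split <;> rfl
      rw [hstep]
      have hlt : m + 1 < st.1.length := by omega
      have hlt2 : m + 1 < st.2.1.length := by omega
      refine ⟨by simp [hl1], by simp [hl2], ?_, ?_, ?_⟩
      · intro k hk
        rw [PySem.List.pyGetD_pySetD_natCast _ _ _ _ _ hlt]
        by_cases hkm : k = m + 1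
        · rw [if_pos hkm, hkm]
        · rw [if_neg hkm]; exact hdp k (by omega)
      · intro k hk
        rw [PySem.List.pyGetD_pySetD_natCast _ _ _ _ _ hlt2]
        by_cases hkm : k = m + 1
        · rw [if_pos hkm, hkm]
        · rw [if_neg hkm]; exact hpf k (by omega)
      · rw [hmax, hend]
        by_cases hb : pvBndB groups m = true
        · have hne := pvBndB_true.mp hb
          have hgt : pvDpF groups (m + 1) > pvDpF groups (pvRunStart groups m) := by
            rw [dpF_rs_eq, dpF_succ, if_pos hb]; omega
          rw [if_pos hgt, rs_succ_neg groups m hne]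
          exact ⟨rfl, rfl⟩
        · have heq := pvBndB_false.mp (eq_false_of_ne_true hb)
          have hle : ¬ pvDpF groups (m + 1) > pvDpF groups (pvRunStart groups m) := by
            rw [dpF_rs_eq, dpF_succ, if_neg hb]; omega
          rw [if_neg hle, rs_succ_pos groups m heq]
          exact ⟨rfl, rfl⟩

def pvChain (groups : List Int) (t : ℕ) : List ℕ :=
  if pvRunStart groups t = 0 then [t] else t :: pvChain groups (pvRunStart groups t - 1)
termination_by t
decreasing_by
  have := rs_le groups t
  omega

theorem fil_rs (groups : List Int) (t : ℕ) :
    pvFil groups (pvRunStart groups t) = pvFil groups t := by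
  rw [fil_eq groups (pvRunStart groups t), rs_idem, fil_eq groups t]

theorem chain_rev (groups : List Int) (t : ℕ) :
    (pvChain groups t).reverse = pvFil groups t ++ [t] := by
  induction t using Nat.strong_induction_on with
  | _ t ih =>
      rw [pvChain]
      by_cases h0 : pvRunStart groups t = 0
      · rw [if_pos h0, fil_eq groups t, if_pos h0]
        simp
      · rw [if_neg h0, List.reverse_cons,
            ih (pvRunStart groups t - 1) (by have := rs_le groups t; omega),
            fil_eq groups t, if_neg h0]

theorem back_neg_one (words : List String) (prev : List Int) :
    ∀ f acc, pvBackA words prev f (-1) acc = acc := by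
  intro f acc
  cases f <;> simp [pvBackA]

theorem backA_chain (words : List String) (prev groups : List Int) :
    ∀ (t fuel : ℕ) (acc : List String), t < fuel →
      (∀ k, k ≤ t → PySem.List.pyGetD prev (k : Int) (-1) = pvPF groups k) →
      pvBackA words prev fuel (t : Int) acc
        = acc ++ (pvChain groups t).map (fun k => words.getD k "") := by
  intro t
  induction t using Nat.strong_induction_on with
  | _ t ih =>
      intro fuel acc hf hpf
      cases fuel with
      | zero => omega
      | succ f =>
          rw [pvBackA, if_neg (by omega), hpf t le_rfl, PySem.List.pyGetD_natCast]
          by_cases h0 : pvRunStart groups t = 0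
          · rw [pvPF, if_pos h0, back_neg_one, pvChain, if_pos h0]
            simp
          · rw [pvPF, if_neg h0,
                ih (pvRunStart groups t - 1) (by have := rs_le groups t; omega) f _
                  (by have := rs_le groups t; omega)
                  (fun k hk => hpf k (by have := rs_le groups t; omega))]
            conv_rhs => rw [pvChain, if_neg h0]
            simp

theorem ports_agree (words : List String) (groups : List Int) (hne : words ≠ []) :
    getLongestSubsequence words groups = getLongestSubsequence_alt words groups := by
  have hn : 0 < words.length := List.length_pos_iff.mpr hne
  obtain ⟨hl1, hl2, hdp, hpf, hmax, hend⟩ :=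
    outer_inv groups words.length hn (words.length - 1) (by omega)
  set st := (List.range' 1 (words.length - 1)).foldl (pvStepA groups)
      (List.replicate words.length (1 : Int), List.replicate words.length (-1 : Int), 1, 0)
    with hst
  have hA : getLongestSubsequence words groups
      = (pvBackA words st.2.1 (words.length + 1) st.2.2.2 []).reverse := rfl
  have hB : getLongestSubsequence_alt words groups
      = (pvFil groups (words.length - 1)).map (fun i => words.getD i "")
          ++ [words.getD (pvRunStart groups (words.length - 1)) ""] := rfl
  have hE := rs_le groups (words.length - 1)
  rw [hA, hB, hend,
      backA_chain words st.2.1 groups (pvRunStart groups (words.length - 1))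
        (words.length + 1) [] (by omega)
        (fun k hk => by
          rw [PySem.List.pyGetD_natCast, List.getD_eq_getElem st.2.1 (-1) (by omega),
              ← List.getD_eq_getElem st.2.1 0 (by omega), ← PySem.List.pyGetD_natCast]
          exact hpf k (by omega)),
      List.nil_append, ← List.map_reverse, chain_rev, ← fil_rs groups (words.length - 1),
      List.map_append]
  rfl

-- ===== VERDICT (by name: the statement is the Claim_ definition above) =====
theorem getLongestSubsequence_spec : Claim_equal_getLongestSubsequence := by
  intro words groups _ hpre
  unfold Spec_getLongestSubsequence
  exact ports_agree words groups hpre.1
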